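-- pv_equiv track=rewrite | github.com/QuentinDuval/PythonExperiments | stocks/StockPrices.py | max_right
-- ===== SOURCE A (Python) =====
-- from typing import List
--
-- def max_right(prices: List[int]) -> List[int]:
--     max_profits = [0]
--     max_price = prices[-1]
--     for price in prices[:-1][::-1]:
--         if price > max_price:
--             max_price = price
--         max_profits.append(max(max_profits[-1], max_price - price))
--     return max_profits[::-1]
-- ===== SOURCE B (Python) =====
-- def max_right(prices):
--     n = len(prices)
--     suf = [0] * n
--     suf[n - 1] = prices[-1]
--     for i in range(n - 2, -1, -1):
--         suf[i] = max(suf[i + 1], prices[i])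
--     result = [0] * n
--     best = 0
--     for i in range(n - 1, -1, -1):
--         best = max(best, suf[i] - prices[i])
--         result[i] = best
--     return result
-- ===== Notes on version B (the rewrite author's own statement) =====
-- stated objective: alternative
-- what changed: Replaces A's single fused reverse-pass (reversing the tail, growing a profits list, reversing back) with an explicit suffix-maximum table built right-to-left plus a separate indexed fill-in pass writing result[i] in place.
import Mathlib
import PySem

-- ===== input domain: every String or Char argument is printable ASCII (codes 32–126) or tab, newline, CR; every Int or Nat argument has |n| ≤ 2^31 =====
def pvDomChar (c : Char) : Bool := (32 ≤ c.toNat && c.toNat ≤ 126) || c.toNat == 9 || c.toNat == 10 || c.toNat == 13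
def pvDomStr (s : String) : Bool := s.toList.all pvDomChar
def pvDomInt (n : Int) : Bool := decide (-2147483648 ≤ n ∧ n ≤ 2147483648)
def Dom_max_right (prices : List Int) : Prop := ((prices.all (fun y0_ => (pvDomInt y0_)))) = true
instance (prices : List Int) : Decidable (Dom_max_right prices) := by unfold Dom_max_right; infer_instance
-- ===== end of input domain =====

-- B is an alternative decomposition: a suffix-maximum table pass plus a separate fill-in pass,
-- instead of A's fused reverse-iteration; both raise IndexError on [], excluded by Pre_.

-- ===== PORT A =====
-- one loop step of A: state = (max_price, max_profits); max_profits[-1] via pyGet? (never none: list starts [0])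
def maxRightStep (st : Int × List Int) (price : Int) : Int × List Int :=
  let mx := if price > st.1 then price else st.1
  (mx, st.2 ++ [max ((PySem.List.pyGet? st.2 (-1)).getD 0) (mx - price)])

def max_right (prices : List Int) : List Int :=
  let max_profits : List Int := [0]
  let max_price := (PySem.List.pyGet? prices (-1)).getD 0   -- none (IndexError) excluded by Pre_
  let st := ((PySem.List.slice prices none (some (-1))).reverse).foldl maxRightStep (max_price, max_profits)
  st.2.reverse

-- ===== PORT B =====
-- first pass of Source B: the suffix-maximum table, built right-to-left
def buildSuf : List Int → List Int
  | [] => []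
  | [p] => [p]
  | p :: rest =>
    let s := buildSuf (rest)
    (max (s.headD 0) p) :: s

-- second pass of Source B: i from n-1 downto 0, best = max(best, suf[i]-prices[i]), result[i] = best;
-- returns (result suffix, best) for the zipped (suf, prices) suffix
def fillRes : List (Int × Int) → List Int × Int
  | [] => ([], 0)
  | (s, p) :: rest =>
    let rb := fillRes rest
    let b' := max rb.2 (s - p)
    (b' :: rb.1, b')

def max_right_alt (prices : List Int) : List Int :=
  let suf := buildSuf prices
  (fillRes (suf.zip prices)).1

-- ===== PRECONDITION & SPEC =====
-- A raises IndexError on the empty list (prices[-1]); B raises there too.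
def Pre_max_right (prices : List Int) : Prop := prices ≠ []
instance (prices : List Int) : Decidable (Pre_max_right prices) := by unfold Pre_max_right; infer_instance
def pvWitness_max_right : List Int := [3, 1, 4, 1, 5]

def Spec_max_right (prices : List Int) (out : List Int) : Prop := out = max_right_alt prices
instance (prices : List Int) (out : List Int) : Decidable (Spec_max_right prices out) := by unfold Spec_max_right; infer_instance

-- ===== CLAIM (what is proved, stated in full; the proofs are below) =====
def Claim_equal_max_right : Prop := ∀ (prices : List Int), Dom_max_right prices → Pre_max_right prices → Spec_max_right prices (max_right prices)

-- ===== LEMMAS AND PROOFS =====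

theorem fillRes_head (l : List (Int × Int)) (h : l ≠ []) :
    (fillRes l).1 = (fillRes l).2 :: (fillRes l.tail).1 := by
  cases l with
  | nil => exact absurd rfl h
  | cons x t => cases x; simp [fillRes]

theorem buildSuf_cons (p : Int) (t : List Int) (h : t ≠ []) :
    buildSuf (p :: t) = (max ((buildSuf t).headD 0) p) :: buildSuf t := by
  cases t with
  | nil => exact absurd rfl h
  | cons q t' => rfl

-- the key invariant: folding A's step over the reversed init equals foldr over the init,
-- and that foldr computes (suffix max, B's result reversed) for xs ++ [lastp]
theorem buildSuf_ne_nil (l : List Int) (h : l ≠ []) : buildSuf l ≠ [] := by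
  cases l with
  | nil => exact absurd rfl h
  | cons a b => cases b <;> simp [buildSuf]

theorem key (xs : List Int) (lastp : Int) :
    xs.foldr (fun x st => maxRightStep st x) (lastp, ([0] : List Int)) =
      ((buildSuf (xs ++ [lastp])).headD 0,
       ((fillRes ((buildSuf (xs ++ [lastp])).zip (xs ++ [lastp]))).1.reverse)) := by
  induction xs with
  | nil => simp [buildSuf, fillRes]
  | cons x t ih =>
    have hne : t ++ [lastp] ≠ [] := by simp
    have hzne : ((buildSuf (t ++ [lastp])).zip (t ++ [lastp])) ≠ [] := by
      have h1 := buildSuf_ne_nil (t ++ [lastp]) hne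
      cases hb : buildSuf (t ++ [lastp]) with
      | nil => exact absurd hb h1
      | cons c d =>
        cases ht : t ++ [lastp] with
        | nil => exact absurd ht hne
        | cons a b => simp
    rw [List.foldr_cons, ih]
    rw [show ((x :: t) ++ [lastp]) = x :: (t ++ [lastp]) from rfl,
        buildSuf_cons x (t ++ [lastp]) hne]
    set S := buildSuf (t ++ [lastp]) with hS
    set m := S.headD 0 with hm
    -- zip of the extended lists
    have hz : ((max m x :: S).zip (x :: (t ++ [lastp]))) = (max m x, x) :: S.zip (t ++ [lastp]) := rfl
    rw [hz]
    -- unfold fillRes on the cons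
    simp only [fillRes, maxRightStep]
    have hmx : (if x > m then x else m) = max m x := by split_ifs <;> omega
    have hhead := fillRes_head _ hzne
    have hlast : (PySem.List.pyGet? ((fillRes (S.zip (t ++ [lastp]))).1.reverse) (-1)).getD 0
        = (fillRes (S.zip (t ++ [lastp]))).2 := by
      rw [hhead]
      simp [PySem.List.pyGet?, PySem.List.pyIdx?]
    rw [hmx, hlast]
    simp [List.reverse_cons, max_comm]

theorem max_right_spec : Claim_equal_max_right := by
  intro prices _ hpre
  rcases List.eq_nil_or_concat' prices with rfl | ⟨xs, lastp, rfl⟩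
  · exact absurd rfl hpre
  unfold Spec_max_right max_right max_right_alt
  have hget : (PySem.List.pyGet? (xs ++ [lastp]) (-1)).getD 0 = lastp := by
    simp [PySem.List.pyGet?, PySem.List.pyIdx?]
  have hslice : PySem.List.slice (xs ++ [lastp]) none (some (-1)) = xs := by
    rw [PySem.List.slice_to_neg_one]; simp
  show (List.foldl maxRightStep ((PySem.List.pyGet? (xs ++ [lastp]) (-1)).getD 0, [0])
        (PySem.List.slice (xs ++ [lastp]) none (some (-1))).reverse).2.reverse
      = (fillRes ((buildSuf (xs ++ [lastp])).zip (xs ++ [lastp]))).1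
  rw [hget, hslice, List.foldl_reverse, key xs lastp]
  simp
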